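-- pv_equiv track=rewrite | github.com/hocop/VAE-paraphraser-and-dialogue-model | vae/multiencoder_utils.py | divide_numbers
-- ===== SOURCE A (Python) =====
-- import string
--
-- def divide_numbers(toks):
--     res = []
--     for tok in toks:
--         cur_line = ''
--         for c in tok:
--             if c in string.digits:
--                 if len(cur_line) > 0:
--                     res.append(cur_line)
--                 res.append(c)
--                 cur_line = ''
--             else:
--                 cur_line += c
--         if len(cur_line) > 0:
--             res.append(cur_line)
--     return res
-- ===== SOURCE B (Python) =====
-- import re
--
-- _TOK_RE = re.compile(r'[0-9]|[^0-9]+')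
--
-- def divide_numbers(toks):
--     res = []
--     for tok in toks:
--         res.extend(_TOK_RE.findall(tok))
--     return res
-- ===== Notes on version B (the rewrite author's own statement) =====
-- stated objective: idiomatic
-- what changed: Replaces the char-by-char accumulator loop (building cur_line and flushing it around each digit) with a single regex tokenizer per token: re.findall(r'[0-9]|[^0-9]+') yields each ASCII digit alone and each maximal non-digit run, flattened with extend.
import Mathlib
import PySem

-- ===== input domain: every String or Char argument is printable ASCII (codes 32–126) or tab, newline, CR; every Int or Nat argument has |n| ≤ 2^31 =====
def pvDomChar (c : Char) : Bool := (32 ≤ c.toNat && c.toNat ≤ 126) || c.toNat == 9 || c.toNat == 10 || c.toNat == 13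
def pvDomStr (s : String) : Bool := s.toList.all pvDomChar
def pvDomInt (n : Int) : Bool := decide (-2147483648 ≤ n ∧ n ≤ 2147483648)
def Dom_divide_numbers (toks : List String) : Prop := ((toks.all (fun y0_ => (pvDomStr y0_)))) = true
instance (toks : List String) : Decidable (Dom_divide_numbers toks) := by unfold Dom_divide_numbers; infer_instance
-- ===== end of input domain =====

-- B replaces A's char-by-char accumulator loop with a per-token regex tokenizer
-- (one digit OR a maximal non-digit run), flattened; objective: idiomatic, same cost.

-- ===== PORT A =====
-- inner loop over a token's characters; state = (res, cur_line); cur_line is ported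
-- as its character list (exact: Lean String equality is character-list equality).
-- 'c in string.digits' is ported literally as membership in the chars of "0123456789".
def dnInner (res : List String) (cur : List Char) : List Char → List String
  | [] => if cur.length > 0 then res ++ [String.ofList cur] else res
  | c :: cs =>
      if ("0123456789".toList).contains c then
        dnInner ((if cur.length > 0 then res ++ [String.ofList cur] else res) ++ [String.ofList [c]]) [] cs
      else
        dnInner res (cur ++ [c]) cs

def dnOuter (res : List String) : List String → List String
  | [] => res
  | tok :: ts => dnOuter (dnInner res [] tok.toList) ts

def divide_numbers (toks : List String) : List String := dnOuter [] toks

-- ===== PORT B =====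
-- transliteration of re.findall(r'[0-9]|[^0-9]+', tok): at each position, a digit
-- matches alone, otherwise the maximal run of non-digits matches ([0-9] is exactly
-- Char.isDigit: ASCII '0'..'9').
def dnFindall : List Char → List (List Char)
  | [] => []
  | c :: cs =>
      if c.isDigit then [c] :: dnFindall cs
      else (c :: cs.takeWhile (fun d => !d.isDigit)) :: dnFindall (cs.dropWhile (fun d => !d.isDigit))
termination_by cs => cs.length
decreasing_by
  · simp
  · simp
    exact List.length_dropWhile_le _ _

def divide_numbers_alt (toks : List String) : List String :=
  toks.flatMap (fun tok => (dnFindall tok.toList).map (fun l => String.ofList l))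

-- ===== PRECONDITION & SPEC =====
def Spec_divide_numbers (toks : List String) (out : List String) : Prop := out = divide_numbers_alt toks
instance (toks : List String) (out : List String) : Decidable (Spec_divide_numbers toks out) := by unfold Spec_divide_numbers; infer_instance

-- ===== CLAIM (what is proved, stated in full; the proofs are below) =====
def Claim_equal_divide_numbers : Prop := ∀ (toks : List String), Dom_divide_numbers toks → Spec_divide_numbers toks (divide_numbers toks)

-- ===== LEMMAS AND PROOFS =====

-- A's digit test ('c in string.digits') and B's ([0-9], i.e. Char.isDigit) agree on every character
theorem digit_test_eq (c : Char) : ("0123456789".toList).contains c = c.isDigit := by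
  have hl : "0123456789".toList = ['0','1','2','3','4','5','6','7','8','9'] := rfl
  rw [hl]
  by_cases h : c.isDigit
  · obtain ⟨hlo, hhi⟩ : 48 ≤ c.toNat ∧ c.toNat ≤ 57 := by
      simp [Char.isDigit, UInt32.le_iff_toNat_le] at h
      exact ⟨h.1, h.2⟩
    have hc : c = Char.ofNat c.toNat := (Char.ofNat_toNat c).symm
    rw [h]
    interval_cases hn : c.toNat <;> rw [hc] <;> decide
  · have hb : c.isDigit = false := by simpa using h
    rw [hb]
    simp only [List.contains_eq_mem, decide_eq_false_iff_not]
    intro hm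
    fin_cases hm <;> simp_all

theorem takeWhile_run (run : List Char) (c : Char) (cs : List Char)
    (hrun : ∀ x ∈ run, x.isDigit = false) (hc : c.isDigit = true) :
    (run ++ c :: cs).takeWhile (fun d => !d.isDigit) = run ∧
    (run ++ c :: cs).dropWhile (fun d => !d.isDigit) = c :: cs := by
  induction run with
  | nil => simp [hc]
  | cons a run ih =>
      have ha : a.isDigit = false := hrun a (by simp)
      have := ih (fun x hx => hrun x (by simp [hx]))
      simp [ha, this.1, this.2]

theorem dnInner_eq (cs : List Char) : ∀ (res : List String) (cur : List Char),
    (∀ x ∈ cur, x.isDigit = false) →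
    dnInner res cur cs = res ++ (dnFindall (cur ++ cs)).map (fun l => String.ofList l) := by
  induction cs with
  | nil =>
      intro res cur hcur
      cases cur with
      | nil => simp [dnInner, dnFindall]
      | cons a cur =>
          have ha : a.isDigit = false := hcur a (by simp)
          have hrest : ∀ x ∈ cur, (fun d => !d.isDigit) x := by
            intro x hx; simp [hcur x (by simp [hx])]
          simp only [dnInner, dnFindall, List.append_nil, ha, Bool.false_eq_true, if_false,
            List.length_cons, Nat.succ_pos, if_true, gt_iff_lt]
          rw [List.takeWhile_eq_self_iff.mpr (by simpa using hrest),
              List.dropWhile_eq_nil_iff.mpr (by simpa using hrest)]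
          simp [dnFindall]
  | cons c cs ih =>
      intro res cur hcur
      have hmem := digit_test_eq c
      by_cases hd : c.isDigit
      · rw [hd] at hmem
        cases cur with
        | nil =>
            simp only [dnInner, hmem, if_true, List.length_nil, gt_iff_lt, Nat.lt_irrefl, if_false,
              List.nil_append]
            rw [ih _ [] (by simp)]
            simp [dnFindall, hd]
        | cons a cur =>
            have ha : a.isDigit = false := hcur a (by simp)
            have hrest : ∀ x ∈ cur, x.isDigit = false := fun x hx => hcur x (by simp [hx])
            have htw := takeWhile_run cur c cs hrest hd
            simp only [dnInner, hmem, if_true, List.length_cons, Nat.succ_pos, gt_iff_lt]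
            rw [ih _ [] (by simp)]
            simp only [List.cons_append, dnFindall, ha, Bool.false_eq_true, if_false]
            rw [htw.1, htw.2]
            simp [dnFindall, hd]
      · have hd' : c.isDigit = false := by simpa using hd
        rw [hd'] at hmem
        simp only [dnInner, hmem, Bool.false_eq_true, if_false]
        rw [ih res (cur ++ [c]) ?_]
        · simp
        · intro x hx
          rcases List.mem_append.1 hx with h | h
          · exact hcur x h
          · simp at h; subst h; exact hd'

theorem dnOuter_eq (ts : List String) : ∀ (res : List String),
    dnOuter res ts = res ++ divide_numbers_alt ts := by
  induction ts with
  | nil => intro res; simp [dnOuter, divide_numbers_alt]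
  | cons t ts ih =>
      intro res
      simp only [dnOuter]
      rw [dnInner_eq t.toList res [] (by simp), ih]
      simp [divide_numbers_alt]

-- ===== VERDICT (by name: the statement is the Claim_ definition above) =====
theorem divide_numbers_spec : Claim_equal_divide_numbers := by
  intro toks _
  unfold Spec_divide_numbers divide_numbers
  rw [dnOuter_eq]
  simp
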